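-- pv_equiv track=rewrite | github.com/phoenix221003/dsa-project | app/server.py | convertEncryptedToWords
-- ===== SOURCE A (Python) =====
-- def checkDecryption(keyLessWords):
--     keyError = True
--     for word, level in keyLessWords:
--         if level == 1:
--             keyError = False
--     return keyError
--
-- def convertEncryptedToWords(encrypted):
--     if checkDecryption(encrypted):
--         return None
--     words = []
--     for word, level in encrypted:
--         if level == 1:
--             word = "".join([str(chr(int(word[i:i+3]))) if word[i:i+3].isdigit() else word[i:i+3] for i in range(0, len(word), 3)])
--         words.append(word)
--     return words
-- ===== SOURCE B (Python) =====
-- def _decode(word):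
--     # decode a level-1 word recursively, 3 characters at a time
--     if not word:
--         return ""
--     chunk = word[:3]
--     piece = chr(int(chunk)) if chunk.isdigit() else chunk
--     return piece + _decode(word[3:])
--
-- def convertEncryptedToWords(encrypted):
--     found = False
--     words = []
--     for word, level in encrypted:
--         if level == 1:
--             found = True
--             word = _decode(word)
--         words.append(word)
--     return words if found else None
-- ===== Notes on version B (the rewrite author's own statement) =====
-- stated objective: simpler
-- what changed: B fuses A's separate checkDecryption pre-pass and decoding loop into a single pass that maintains a 'found' flag, and replaces the range/slice/join comprehension with a recursive 3-char-chunk decoder helper.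
import Mathlib
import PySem

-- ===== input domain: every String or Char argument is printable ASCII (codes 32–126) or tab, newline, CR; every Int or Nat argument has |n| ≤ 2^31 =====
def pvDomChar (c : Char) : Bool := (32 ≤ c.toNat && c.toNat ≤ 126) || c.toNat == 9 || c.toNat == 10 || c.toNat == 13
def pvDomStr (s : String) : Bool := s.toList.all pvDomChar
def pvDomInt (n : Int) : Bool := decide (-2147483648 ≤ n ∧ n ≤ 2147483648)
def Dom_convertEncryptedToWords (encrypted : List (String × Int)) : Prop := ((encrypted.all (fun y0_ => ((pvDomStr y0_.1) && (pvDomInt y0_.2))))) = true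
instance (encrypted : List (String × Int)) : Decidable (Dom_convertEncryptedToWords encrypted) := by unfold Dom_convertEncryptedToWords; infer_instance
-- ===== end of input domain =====

-- B fuses A's two passes into one loop with a 'found' flag and decodes words with a
-- recursive 3-char-chunk helper instead of a range/slice/join comprehension (objective: simpler).

-- ===== PORT A =====
-- helper checkDecryption: fold over the list keeping the keyError flag, exactly as A's loop
def checkDecryption (keyLessWords : List (String × Int)) : Bool :=
  keyLessWords.foldl (fun keyError wl => if wl.2 == 1 then false else keyError) true

-- A's comprehension "".join([str(chr(int(word[i:i+3]))) if word[i:i+3].isdigit() else word[i:i+3]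
--                            for i in range(0, len(word), 3)]), on the List Char side.
-- (On an isdigit chunk int() always succeeds, so the `.getD 0` fallback is unreachable;
--  chr(n) is Char.ofNat n — exact, the chunk has at most 3 digits so n ≤ 999.)
def pvDecodeACore (cs : List Char) : List Char :=
  PySem.Chars.join []
    ((PySem.List.pyRange 0 (cs.length : Int) 3).map (fun i =>
      let chunk := PySem.Chars.slice cs (some i) (some (i + 3))
      if PySem.Chars.strIsdigit chunk then
        [Char.ofNat ((PySem.Int.ofChars? chunk).getD 0).toNat]
      else chunk))

def pvDecodeA (word : String) : String := String.ofList (pvDecodeACore word.toList)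

def convertEncryptedToWords (encrypted : List (String × Int)) : Option (List String) :=
  if checkDecryption encrypted then none
  else
    some (encrypted.foldl
      (fun words wl => words ++ [if wl.2 == 1 then pvDecodeA wl.1 else wl.1]) [])

-- ===== PORT B =====
-- Source B's _decode: recursion on the word, one 3-char chunk at a time
def pvDecodeB : List Char → List Char
  | [] => []
  | c :: rest =>
    let chunk := (c :: rest).take 3
    (if PySem.Chars.strIsdigit chunk then
        [Char.ofNat ((PySem.Int.ofChars? chunk).getD 0).toNat]
     else chunk) ++ pvDecodeB (rest.drop 2)
termination_by cs => cs.length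
decreasing_by
  simp only [List.length_drop, List.length_cons]; omega

def convertEncryptedToWords_alt (encrypted : List (String × Int)) : Option (List String) :=
  let r := encrypted.foldl
    (fun (st : Bool × List String) wl =>
      if wl.2 == 1 then (true, st.2 ++ [String.ofList (pvDecodeB wl.1.toList)])
      else (st.1, st.2 ++ [wl.1]))
    (false, [])
  if r.1 then some r.2 else none

-- ===== PRECONDITION & SPEC =====
def Spec_convertEncryptedToWords (encrypted : List (String × Int)) (out : Option (List String)) : Prop := out = convertEncryptedToWords_alt encrypted
instance (encrypted : List (String × Int)) (out : Option (List String)) : Decidable (Spec_convertEncryptedToWords encrypted out) := by unfold Spec_convertEncryptedToWords; infer_instance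

-- ===== CLAIM (what is proved, stated in full; the proofs are below) =====
def Claim_equal_convertEncryptedToWords : Prop := ∀ (encrypted : List (String × Int)), Dom_convertEncryptedToWords encrypted → Spec_convertEncryptedToWords encrypted (convertEncryptedToWords encrypted)

-- ===== LEMMAS AND PROOFS =====

-- the chunk-to-piece function both decoders apply
def pvPiece (chunk : List Char) : List Char :=
  if PySem.Chars.strIsdigit chunk then
    [Char.ofNat ((PySem.Int.ofChars? chunk).getD 0).toNat]
  else chunk

theorem join_empty_flatten (l : List (List Char)) :
    PySem.Chars.join [] l = l.flatten := by
  induction l with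
  | nil => simp [PySem.Chars.join_nil]
  | cons p rest ih =>
    cases rest with
    | nil => simp [PySem.Chars.join_singleton]
    | cons q r => simp [PySem.Chars.join_cons_cons, ih]

theorem decodeACore_formula (cs : List Char) :
    pvDecodeACore cs =
      ((List.range ((cs.length + 2) / 3)).map
        (fun k => pvPiece ((cs.drop (3 * k)).take 3))).flatten := by
  unfold pvDecodeACore
  rw [join_empty_flatten,
      PySem.List.pyRange_of_pos 0 (cs.length : Int) (by norm_num)]
  rcases Nat.eq_zero_or_pos cs.length with h | h
  · simp [h]
  · have hlt : (0 : Int) < cs.length := by exact_mod_cast h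
    rw [if_pos hlt, List.map_map]
    have hcount : (((cs.length : Int) - 0 + 3 - 1) / 3).toNat = (cs.length + 2) / 3 := by
      omega
    rw [hcount]
    congr 1
    apply List.map_congr_left
    intro k _
    simp only [Function.comp_apply, pvPiece]
    rw [show (0 : Int) + 3 * (k : Int) + 3 = ((3 * k + 3 : Nat) : Int) by push_cast; ring,
        show (0 : Int) + 3 * (k : Int) = ((3 * k : Nat) : Int) by push_cast; ring,
        PySem.Chars.slice_eq_listSlice, PySem.List.slice_natCast]
    simp

theorem decode_eq (cs : List Char) : pvDecodeACore cs = pvDecodeB cs := by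
  induction hn : cs.length using Nat.strong_induction_on generalizing cs with
  | _ n ih =>
    rw [decodeACore_formula]
    cases cs with
    | nil => simp [pvDecodeB]
    | cons c rest =>
      have hlen : (c :: rest).length = rest.length + 1 := by simp
      have hm : ((c :: rest).length + 2) / 3 = ((rest.drop 2).length + 2) / 3 + 1 := by
        simp only [List.length_cons, List.length_drop]; omega
      rw [hm, List.range_succ_eq_map, List.map_cons, List.flatten_cons, List.map_map]
      have htail :
          ((List.range (((rest.drop 2).length + 2) / 3)).map
            ((fun k => pvPiece (((c :: rest).drop (3 * k)).take 3)) ∘ (· + 1))).flatten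
          = pvDecodeB (rest.drop 2) := by
        rw [← ih (rest.drop 2).length (by subst hn; simp only [List.length_drop, List.length_cons]; omega)
              (rest.drop 2) rfl, decodeACore_formula]
        congr 1
        apply List.map_congr_left
        intro k _
        simp only [Function.comp]
        congr 2
        have : 3 * (k + 1) = 3 + 3 * k := by ring
        rw [this, ← List.drop_drop]
        simp [List.drop_drop]
      rw [htail]
      simp only [Nat.mul_zero, List.drop_zero]
      rw [show pvDecodeB (c :: rest) =
          (if PySem.Chars.strIsdigit ((c :: rest).take 3) then
              [Char.ofNat ((PySem.Int.ofChars? ((c :: rest).take 3)).getD 0).toNat]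
           else (c :: rest).take 3) ++ pvDecodeB (rest.drop 2) from by rw [pvDecodeB]]
      rfl

theorem decodeA_alt (w : String) : pvDecodeA w = String.ofList (pvDecodeB w.toList) := by
  unfold pvDecodeA; rw [decode_eq]

theorem checkDecryption_eq (enc : List (String × Int)) (b : Bool) :
    enc.foldl (fun keyError wl => if wl.2 == 1 then false else keyError) b
      = (b && !(enc.any (fun wl => wl.2 == 1))) := by
  induction enc generalizing b with
  | nil => simp
  | cons hd tl ih =>
    simp only [List.foldl_cons, List.any_cons]
    by_cases h : hd.2 == 1
    · rw [if_pos h, ih]; simp [h]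
    · rw [if_neg h, ih]; simp [h]

theorem bfold_eq (enc : List (String × Int)) (found : Bool) (acc : List String) :
    enc.foldl
      (fun (st : Bool × List String) wl =>
        if wl.2 == 1 then (true, st.2 ++ [String.ofList (pvDecodeB wl.1.toList)])
        else (st.1, st.2 ++ [wl.1])) (found, acc)
      = (found || enc.any (fun wl => wl.2 == 1),
         acc ++ enc.map (fun wl =>
           if wl.2 == 1 then String.ofList (pvDecodeB wl.1.toList) else wl.1)) := by
  induction enc generalizing found acc with
  | nil => simp
  | cons hd tl ih =>
    simp only [List.foldl_cons, List.any_cons, List.map_cons]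
    by_cases h : hd.2 == 1
    · rw [if_pos h, ih]; simp [h]
    · rw [if_neg h, ih]; simp [h]

theorem afold_eq (enc : List (String × Int)) (acc : List String) :
    enc.foldl (fun words wl => words ++ [if wl.2 == 1 then pvDecodeA wl.1 else wl.1]) acc
      = acc ++ enc.map (fun wl => if wl.2 == 1 then pvDecodeA wl.1 else wl.1) := by
  induction enc generalizing acc with
  | nil => simp
  | cons hd tl ih =>
    simp only [List.foldl_cons, List.map_cons]
    rw [ih]; simp

-- ===== VERDICT (by name: the statement is the Claim_ definition above) =====
theorem convertEncryptedToWords_spec : Claim_equal_convertEncryptedToWords := by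
  intro enc _
  unfold Spec_convertEncryptedToWords convertEncryptedToWords convertEncryptedToWords_alt
  unfold checkDecryption
  rw [checkDecryption_eq, bfold_eq, afold_eq]
  simp only [Bool.true_and, Bool.false_or, List.nil_append]
  by_cases h : enc.any (fun wl => wl.2 == 1)
  · simp [h, decodeA_alt]
  · simp [h]
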